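-- pv_equiv track=rewrite | github.com/ema-aka-young/World-Cup-Analysis | ids_worldcup.py | consecutive_wins
-- ===== SOURCE A (Python) =====
-- def consecutive_wins(s, Country):
--     num = 0
--     maxn = 0
--     for c in s:
--         if c == Country:
--             num += 1
--             maxn = max(num, maxn)
--         else:
--             num = 0
--     return maxn
-- ===== SOURCE B (Python) =====
-- def consecutive_wins(s, Country):
--     best = 0
--     i = 0
--     n = len(s)
--     while i < n:
--         if s[i] == Country:
--             j = i + 1
--             while j < n and s[j] == Country:
--                 j += 1
--             if j - i > best:
--                 best = j - i
--             i = j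
--         else:
--             i += 1
--     return best
-- ===== Notes on version B (the rewrite author's own statement) =====
-- stated objective: alternative
-- what changed: B scans run by run: on meeting Country it advances an inner pointer to the end of the maximal run and compares the whole run length with the best, instead of A's single counter that increments and resets per element.
import Mathlib
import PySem

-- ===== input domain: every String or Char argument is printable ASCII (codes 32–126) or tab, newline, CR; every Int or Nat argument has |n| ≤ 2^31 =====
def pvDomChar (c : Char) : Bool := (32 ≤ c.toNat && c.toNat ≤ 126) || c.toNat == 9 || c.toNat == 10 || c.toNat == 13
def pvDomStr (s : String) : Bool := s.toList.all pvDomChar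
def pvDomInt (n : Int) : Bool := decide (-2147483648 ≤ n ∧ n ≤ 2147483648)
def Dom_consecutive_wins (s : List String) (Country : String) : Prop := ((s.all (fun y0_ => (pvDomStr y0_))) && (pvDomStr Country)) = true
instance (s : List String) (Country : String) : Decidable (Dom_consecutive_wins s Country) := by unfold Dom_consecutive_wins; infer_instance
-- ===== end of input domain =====

-- B replaces A's increment-and-reset counter with a run-skipping scan (inner pointer to the
-- end of each maximal run of Country, then one comparison per run); same O(n) cost.


-- ===== PORT A =====
-- A's loop state: (num, maxn); reset num on mismatch, update maxn on match.
def cwStep (Country : String) (st : Int × Int) (c : String) : Int × Int :=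
  if c == Country then (st.1 + 1, max (st.1 + 1) st.2) else (0, st.2)

def consecutive_wins (s : List String) (Country : String) : Int :=
  (s.foldl (cwStep Country) ((0 : Int), (0 : Int))).2

-- ===== PORT B =====
-- B's outer while-loop: skip a mismatching element, or consume a whole maximal run of
-- Country (the inner while-loop = takeWhile/dropWhile) and compare its length with the rest.
def cwAltGo (Country : String) : List String → Int
  | [] => 0
  | c :: r =>
    if c == Country then
      max (1 + ((r.takeWhile (· == Country)).length : Int))
          (cwAltGo Country (r.dropWhile (· == Country)))
    else cwAltGo Country r
termination_by l => l.length
decreasing_by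
  all_goals first
    | exact Nat.lt_succ_of_le (List.length_dropWhile_le _ _)
    | exact Nat.lt_succ_self _

def consecutive_wins_alt (s : List String) (Country : String) : Int :=
  cwAltGo Country s

-- ===== PRECONDITION & SPEC =====
def Spec_consecutive_wins (s : List String) (Country : String) (out : Int) : Prop := out = consecutive_wins_alt s Country
instance (s : List String) (Country : String) (out : Int) : Decidable (Spec_consecutive_wins s Country out) := by unfold Spec_consecutive_wins; infer_instance

-- ===== CLAIM (what is proved, stated in full; the proofs are below) =====
def Claim_equal_consecutive_wins : Prop := ∀ (s : List String) (Country : String), Dom_consecutive_wins s Country → Spec_consecutive_wins s Country (consecutive_wins s Country)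

-- ===== LEMMAS AND PROOFS =====

-- B's result is nonnegative.
theorem cwAltGo_nonneg (Country : String) : ∀ (s : List String), 0 ≤ cwAltGo Country s
  | [] => by simp [cwAltGo]
  | c :: r => by
    rw [cwAltGo]
    split
    · have := cwAltGo_nonneg Country (r.dropWhile (· == Country))
      have hl : (0 : Int) ≤ ((r.takeWhile (· == Country)).length : Int) := by positivity
      omega
    · exact cwAltGo_nonneg Country r
termination_by s => s.length
decreasing_by
  all_goals first
    | exact Nat.lt_succ_of_le (List.length_dropWhile_le _ _)
    | exact Nat.lt_succ_self _

-- A's fold over a list made only of Country, starting from (n, m) with n ≤ m.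
theorem cwFold_run (Country : String) : ∀ (l : List String), (∀ c ∈ l, c = Country) →
    ∀ n m : Int, n ≤ m →
    l.foldl (cwStep Country) (n, m) = (n + l.length, max (n + l.length) m)
  | [], _, n, m, h => by simp [max_eq_right h]
  | c :: l, hall, n, m, h => by
    have hc : c = Country := hall c (List.mem_cons_self ..)
    have hl : ∀ x ∈ l, x = Country := fun x hx => hall x (List.mem_cons_of_mem _ hx)
    simp only [List.foldl_cons, cwStep, hc, BEq.rfl, if_true]
    rw [cwFold_run Country l hl (n + 1) (max (n + 1) m) (le_max_left _ _)]
    have hlen : (0 : Int) ≤ (l.length : Int) := by positivity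
    simp only [Prod.mk.injEq, List.length_cons]
    push_cast
    omega

-- If dropWhile returns a cons, its head falsifies the predicate.
theorem pv_dropWhile_head_false {a : Type} (p : a -> Bool) :
    forall (l : List a) {c : a} {r : List a}, l.dropWhile p = c :: r -> p c = false
  | [], c, r, h => by simp [List.dropWhile] at h
  | x :: l, c, r, h => by
    by_cases hpx : p x = true
    · rw [List.dropWhile_cons, if_pos hpx] at h
      exact pv_dropWhile_head_false p l h
    · rw [List.dropWhile_cons, if_neg hpx] at h
      cases h
      simpa using hpx

-- Main invariant: A's fold from (0, m) computes max m (B's scan), for 0 <= m.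
theorem cw_main (Country : String) : forall (s : List String) (m : Int), 0 <= m ->
    (s.foldl (cwStep Country) (0, m)).2 = max m (cwAltGo Country s)
  | [], m, hm => by simp [cwAltGo]; omega
  | c :: r, m, hm => by
    by_cases hc : c = Country
    · rw [cwAltGo]
      simp only [hc, BEq.rfl, if_true]
      rw [List.foldl_cons]
      have hstep : cwStep Country ((0 : Int), m) Country = (1, max 1 m) := by
        simp [cwStep]
      rw [hstep]
      have htk : forall x, x ∈ r.takeWhile (· == Country) -> x = Country := by
        intro x hx
        have := List.mem_takeWhile_imp hx
        simpa [beq_iff_eq] using this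
      conv_lhs => rw [← List.takeWhile_append_dropWhile (p := (· == Country)) (l := r)]
      rw [List.foldl_append, cwFold_run Country _ htk 1 (max 1 m) (le_max_left _ _)]
      cases hdw : List.dropWhile (fun x => x == Country) r with
      | nil =>
        simp only [List.foldl_nil, cwAltGo]
        omega
      | cons c' r' =>
        have hc' : (c' == Country) = false := pv_dropWhile_head_false (fun x => x == Country) r hdw
        have hstep2 : cwStep Country
            ((1 : Int) + ((r.takeWhile (· == Country)).length : Int),
             max (1 + ((r.takeWhile (· == Country)).length : Int)) (max 1 m)) c'
            = (0, max (1 + ((r.takeWhile (· == Country)).length : Int)) (max 1 m)) := by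
          simp [cwStep, hc']
        rw [List.foldl_cons, hstep2, cw_main Country r' _ (by omega)]
        have hgo : cwAltGo Country (c' :: r') = cwAltGo Country r' := by
          rw [cwAltGo, hc']
          simp
        rw [hgo]
        omega
    · have hcb : (c == Country) = false := by simpa [beq_iff_eq] using hc
      rw [cwAltGo]
      simp only [hcb]
      rw [List.foldl_cons]
      have hstep : cwStep Country ((0 : Int), m) c = (0, m) := by
        simp [cwStep, hcb]
      rw [hstep]
      exact cw_main Country r m hm
termination_by s => s.length
decreasing_by
  all_goals first
    | (simp only [List.length_cons]; omega)
    | (have h1 := List.length_dropWhile_le (fun x => x == Country) r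
       rw [hdw] at h1
       simp only [List.length_cons] at h1 ⊢
       omega)

-- ===== VERDICT (by name: the statement is the Claim_ definition above) =====
theorem consecutive_wins_spec : Claim_equal_consecutive_wins := by
  intro s Country _
  unfold Spec_consecutive_wins consecutive_wins consecutive_wins_alt
  rw [cw_main Country s 0 le_rfl]
  exact max_eq_right (cwAltGo_nonneg Country s)
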